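-- pv_equiv track=rewrite | github.com/gaieepo/tetris | main.py | gen_n_sequences
-- ===== SOURCE A (Python) =====
-- import copy
--
-- def gen_n_sequences(n, fix=False):
--     s = [list(range(n))]
--     if not fix:
--         if n < 2:
--             return s
--         for i in range(n - 1):
--             l = list(range(n))
--             for j in range(i, n - 1):
--                 l[j], l[j + 1] = l[j + 1], l[j]
--                 s.append(copy.deepcopy(l))
--     else:
--         if n < 3:
--             return s
--         # fix the first hold position
--         for i in range(1, n - 1):
--             l = list(range(n))
--             for j in range(i, n - 1):
--                 l[j], l[j + 1] = l[j + 1], l[j]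
--                 s.append(copy.deepcopy(l))
--     return s
-- ===== SOURCE B (Python) =====
-- def gen_n_sequences(n, fix=False):
--     base = list(range(n))
--     s = [base]
--     if n < (3 if fix else 2):
--         return s
--     lo = 1 if fix else 0
--     for i in range(lo, n - 1):
--         for k in range(i + 1, n):
--             s.append(base[:i] + base[i + 1:k + 1] + [base[i]] + base[k + 1:])
--     return s
-- ===== Notes on version B (the rewrite author's own statement) =====
-- stated objective: simpler
-- what changed: Replaces the incremental adjacent-swap mutation with deepcopy snapshots by a direct closed-form construction of each permutation via list slicing in a comprehension.
import Mathlib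
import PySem

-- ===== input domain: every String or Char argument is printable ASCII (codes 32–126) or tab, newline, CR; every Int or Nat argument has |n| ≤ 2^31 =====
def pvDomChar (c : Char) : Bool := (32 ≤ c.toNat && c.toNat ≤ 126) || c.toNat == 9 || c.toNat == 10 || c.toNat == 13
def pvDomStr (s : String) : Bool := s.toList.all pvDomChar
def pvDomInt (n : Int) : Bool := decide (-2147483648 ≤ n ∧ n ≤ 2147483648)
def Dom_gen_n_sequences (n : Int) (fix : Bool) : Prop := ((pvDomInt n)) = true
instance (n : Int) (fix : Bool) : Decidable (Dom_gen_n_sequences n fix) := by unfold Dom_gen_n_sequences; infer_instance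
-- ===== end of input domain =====

-- B replaces A's incremental adjacent-swap mutation (with deepcopy snapshots) by a
-- direct closed-form slicing construction of each permutation (objective: simpler).

-- ===== PORT A =====
-- l[j], l[j+1] = l[j+1], l[j]  (indices always in range on the reached inputs)
def pvSwapAdj (l : List Int) (j : Int) : List Int :=
  match PySem.List.pyGet? l j, PySem.List.pyGet? l (j + 1) with
  | some a, some b => PySem.List.pySetD (PySem.List.pySetD l j b) (j + 1) a
  | _, _ => l

-- inner loop body: state is (s, l); append a deep copy of l after each swap
def pvInnerA (n : Int) (i : Int) (s : List (List Int)) : List (List Int) :=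
  ((PySem.List.pyRange i (n - 1) 1).foldl
    (fun (p : List (List Int) × List Int) j =>
      let l' := pvSwapAdj p.2 j
      (p.1 ++ [l'], l'))
    (s, PySem.List.pyRange 0 n 1)).1

def gen_n_sequences (n : Int) (fix : Bool) : List (List Int) :=
  let s : List (List Int) := [PySem.List.pyRange 0 n 1]
  if !fix then
    if n < 2 then s
    else (PySem.List.pyRange 0 (n - 1) 1).foldl (fun s i => pvInnerA n i s) s
  else
    if n < 3 then s
    else (PySem.List.pyRange 1 (n - 1) 1).foldl (fun s i => pvInnerA n i s) s

-- ===== PORT B =====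
-- base[:i] + base[i+1:k+1] + [base[i]] + base[k+1:]
def pvRotB (base : List Int) (i k : Int) : List Int :=
  PySem.List.slice base (some 0) (some i) ++
  PySem.List.slice base (some (i + 1)) (some (k + 1)) ++
  [PySem.List.pyGetD base i 0] ++
  PySem.List.slice base (some (k + 1)) none

def gen_n_sequences_alt (n : Int) (fix : Bool) : List (List Int) :=
  let base := PySem.List.pyRange 0 n 1
  let s := [base]
  if n < (if fix then 3 else 2) then s
  else
    let lo : Int := if fix then 1 else 0
    (PySem.List.pyRange lo (n - 1) 1).foldl (fun s i =>
      (PySem.List.pyRange (i + 1) n 1).foldl (fun s k => s ++ [pvRotB base i k]) s) s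

-- ===== PRECONDITION & SPEC =====
def Spec_gen_n_sequences (n : Int) (fix : Bool) (out : List (List Int)) : Prop := out = gen_n_sequences_alt n fix
instance (n : Int) (fix : Bool) (out : List (List Int)) : Decidable (Spec_gen_n_sequences n fix out) := by unfold Spec_gen_n_sequences; infer_instance

-- ===== CLAIM (what is proved, stated in full; the proofs are below) =====
def Claim_equal_gen_n_sequences : Prop := ∀ (n : Int) (fix : Bool), Dom_gen_n_sequences n fix → Spec_gen_n_sequences n fix (gen_n_sequences n fix)

-- ===== LEMMAS AND PROOFS =====

-- the state of A's inner loop after swaps i..j-1 (j = i is the untouched identity)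
def pvSt (n i j : Int) : List Int :=
  PySem.List.pyRange 0 i 1 ++ PySem.List.pyRange (i + 1) (j + 1) 1 ++ [i] ++ PySem.List.pyRange (j + 1) n 1

lemma pvTake_pyRange (a b c : Int) (hab : a ≤ b) (hbc : b ≤ c) :
    (PySem.List.pyRange a c 1).take (b - a).toNat = PySem.List.pyRange a b 1 := by
  rw [PySem.List.pyRange_one_append a b c hab hbc]
  exact List.take_left' (by rw [PySem.List.length_pyRange_one])

lemma pvDrop_pyRange (a b c : Int) (hab : a ≤ b) (hbc : b ≤ c) :
    (PySem.List.pyRange a c 1).drop (b - a).toNat = PySem.List.pyRange b c 1 := by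
  rw [PySem.List.pyRange_one_append a b c hab hbc]
  exact List.drop_left' (by rw [PySem.List.length_pyRange_one])

lemma pvSt_init (n i : Int) (h0 : 0 ≤ i) (hn : i + 1 ≤ n) :
    pvSt n i i = PySem.List.pyRange 0 n 1 := by
  unfold pvSt
  rw [PySem.List.pyRange_one_eq_nil (le_refl (i + 1)),
      PySem.List.pyRange_one_append 0 i n h0 (by omega),
      PySem.List.pyRange_one_append i (i + 1) n (by omega) hn,
      PySem.List.pyRange_one_singleton]
  simp

lemma pvSwap_key (A B : List Int) (x y : Int) (j : Int) (hA : (A.length : Int) = j) :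
    pvSwapAdj (A ++ x :: y :: B) j = A ++ y :: x :: B := by
  unfold pvSwapAdj
  rw [← hA, PySem.List.pyGet?_append_length]
  have h2 : PySem.List.pyGet? (A ++ x :: y :: B) ((A.length : Int) + 1) = some y := by
    simpa using PySem.List.pyGet?_append_right A (x :: y :: B) 1
  rw [h2]
  dsimp only
  rw [PySem.List.pySetD_of_nonneg _ _ (by omega), PySem.List.pySetD_of_nonneg _ _ (by omega)]
  have t1 : ((A.length : Int)).toNat = A.length := by omega
  have t2 : ((A.length : Int) + 1).toNat = A.length + 1 := by omega
  rw [t1, t2, List.set_append_right _ _ (by omega), List.set_append_right _ _ (by omega)]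
  simp

lemma pvSwapAdj_st (n i j : Int) (h0 : 0 ≤ i) (hij : i ≤ j) (hj : j + 1 < n) :
    pvSwapAdj (pvSt n i j) j = pvSt n i (j + 1) := by
  have h21 : j + 1 + 1 = j + 2 := by ring
  have hpost : PySem.List.pyRange (j + 1) n 1 = (j + 1) :: PySem.List.pyRange (j + 2) n 1 := by
    rw [PySem.List.pyRange_one_cons (by omega), h21]
  have hl : pvSt n i j = (PySem.List.pyRange 0 i 1 ++ PySem.List.pyRange (i + 1) (j + 1) 1) ++
      (i :: (j + 1) :: PySem.List.pyRange (j + 2) n 1) := by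
    unfold pvSt; rw [hpost]; simp
  have hr : pvSt n i (j + 1) = (PySem.List.pyRange 0 i 1 ++ PySem.List.pyRange (i + 1) (j + 1) 1) ++
      ((j + 1) :: i :: PySem.List.pyRange (j + 2) n 1) := by
    unfold pvSt
    rw [PySem.List.pyRange_one_succ_right (by omega : i + 1 ≤ j + 1), h21]
    simp
  rw [hl, hr]
  exact pvSwap_key _ _ _ _ _ (by
    rw [List.length_append, PySem.List.length_pyRange_one, PySem.List.length_pyRange_one]; omega)

lemma pvInner_spec (n i : Int) (h0 : 0 ≤ i) :
    ∀ (j : Int) (s : List (List Int)), i ≤ j → j ≤ n - 1 →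
    ((PySem.List.pyRange j (n - 1) 1).foldl
      (fun (p : List (List Int) × List Int) j =>
        let l' := pvSwapAdj p.2 j
        (p.1 ++ [l'], l'))
      (s, pvSt n i j)).1
    = s ++ (PySem.List.pyRange (j + 1) n 1).map (fun k => pvSt n i k) := by
  intro j
  generalize hm : (n - 1 - j).toNat = m
  induction m generalizing j with
  | zero =>
      intro s hij hj
      have hje : j = n - 1 := by omega
      subst hje
      rw [PySem.List.pyRange_one_eq_nil (le_refl (n - 1)),
          PySem.List.pyRange_one_eq_nil (by omega : n ≤ n - 1 + 1)]
      simp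
  | succ m ih =>
      intro s hij hj
      have hjlt : j < n - 1 := by omega
      rw [PySem.List.pyRange_one_cons hjlt]
      simp only [List.foldl_cons]
      rw [pvSwapAdj_st n i j h0 hij (by omega)]
      rw [ih (j + 1) (by omega) (s ++ [pvSt n i (j + 1)]) (by omega) (by omega)]
      rw [PySem.List.pyRange_one_cons (by omega : j + 1 < n)]
      simp

lemma pvInnerA_spec (n i : Int) (h0 : 0 ≤ i) (hi : i < n - 1) (s : List (List Int)) :
    pvInnerA n i s = s ++ (PySem.List.pyRange (i + 1) n 1).map (fun k => pvSt n i k) := by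
  unfold pvInnerA
  rw [← pvSt_init n i h0 (by omega)]
  exact pvInner_spec n i h0 i s le_rfl (by omega)

lemma pvRotB_eq_st (n i k : Int) (h0 : 0 ≤ i) (hik : i < k) (hk : k < n) :
    pvRotB (PySem.List.pyRange 0 n 1) i k = pvSt n i k := by
  unfold pvRotB pvSt
  rw [PySem.List.slice_zero_start, PySem.List.slice_to _ h0,
      PySem.List.slice_toNat _ (by omega : (0:Int) ≤ i + 1) (by omega : (0:Int) ≤ k + 1),
      PySem.List.slice_from _ (by omega : (0:Int) ≤ k + 1)]
  have e1 : i.toNat = (i - 0).toNat := by omega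
  rw [e1, pvTake_pyRange 0 i n h0 (by omega)]
  have e4 : (k + 1).toNat - (i + 1).toNat = (k + 1 - (i + 1)).toNat := by omega
  have e2 : (i + 1).toNat = (i + 1 - 0).toNat := by omega
  rw [e4, e2, pvDrop_pyRange 0 (i + 1) n (by omega) (by omega),
      pvTake_pyRange (i + 1) (k + 1) n (by omega) (by omega)]
  have e3 : (k + 1).toNat = (k + 1 - 0).toNat := by omega
  rw [e3, pvDrop_pyRange 0 (k + 1) n (by omega) (by omega)]
  have hg : PySem.List.pyGetD (PySem.List.pyRange 0 n 1) i 0 = i := by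
    rw [PySem.List.pyGetD_eq_getElem _ 0 h0 (by rw [PySem.List.length_pyRange_one]; omega),
        PySem.List.getElem_pyRange_one]
    omega
  rw [hg]

lemma pv_branch (n lo : Int) (h0 : 0 ≤ lo) :
    (PySem.List.pyRange lo (n - 1) 1).foldl (fun s i => pvInnerA n i s) [PySem.List.pyRange 0 n 1]
    = (PySem.List.pyRange lo (n - 1) 1).foldl (fun s i =>
        (PySem.List.pyRange (i + 1) n 1).foldl (fun s k =>
          s ++ [pvRotB (PySem.List.pyRange 0 n 1) i k]) s) [PySem.List.pyRange 0 n 1] := by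
  have hcong : ∀ (acc : List (List Int)), ∀ x ∈ PySem.List.pyRange lo (n - 1) 1,
      pvInnerA n x acc = acc ++ (PySem.List.pyRange (x + 1) n 1).map
        (fun k => pvRotB (PySem.List.pyRange 0 n 1) x k) := by
    intro acc x hx
    obtain ⟨hx1, hx2⟩ := PySem.List.mem_pyRange_one.1 hx
    rw [pvInnerA_spec n x (by omega) (by omega) acc]
    congr 1
    apply List.map_congr_left
    intro k hk
    obtain ⟨hk1, hk2⟩ := PySem.List.mem_pyRange_one.1 hk
    exact (pvRotB_eq_st n x k (by omega) (by omega) (by omega)).symm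
  rw [PySem.List.foldl_congr_mem _ _ _ _ hcong]
  apply PySem.List.foldl_congr_mem
  intro acc x _
  exact (PySem.List.foldl_append_singleton_eq_map _ _ _).symm

-- ===== VERDICT (by name: the statement is the Claim_ definition above) =====
theorem gen_n_sequences_spec : Claim_equal_gen_n_sequences := by
  intro n fix _
  unfold Spec_gen_n_sequences gen_n_sequences gen_n_sequences_alt
  cases fix with
  | false =>
      by_cases h : n < 2
      · simp [h]
      · simp [h, pv_branch n 0 le_rfl]
  | true =>
      by_cases h : n < 3
      · simp [h]
      · simp [h, pv_branch n 1 (by omega : (0:Int) ≤ 1)]
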